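-- pv_equiv track=rewrite | github.com/adgueva/MSBA | Machine Learning I/Project-Code2-RandomForest-Team2.py | tran_hour
-- ===== SOURCE A (Python) =====
-- def tran_hour(x):
--     x = x % 100
--     while x in [23,0]:
--         return 23
--     while x in [1,2]:
--         return 1
--     while x in [3,4]:
--         return 3
--     while x in [5,6]:
--         return 5
--     while x in [7,8]:
--         return 7
--     while x in [9,10]:
--         return 9
--     while x in [11,12]:
--         return 11
--     while x in [13,14]:
--         return 13
--     while x in [15,16]:
--         return 15
--     while x in [17,18]:
--         return 17
--     while x in [19,20]:
--         return 19
--     while x in [21,22]: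
--         return 21
-- ===== SOURCE B (Python) =====
-- def tran_hour(x):
--     h = x % 100
--     if h < 24:
--         return ((h + 23) % 24) // 2 * 2 + 1
-- ===== Notes on version B (the rewrite author's own statement) =====
-- stated objective: simpler
-- what changed: Replaces the twelve-branch ladder of constant membership checks by a closed-form arithmetic formula: shift the hour by 23 mod 24 and round down to the nearest odd number, ((h+23)%24)//2*2+1, returning None for residues 24..99 via the guard.
import Mathlib
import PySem

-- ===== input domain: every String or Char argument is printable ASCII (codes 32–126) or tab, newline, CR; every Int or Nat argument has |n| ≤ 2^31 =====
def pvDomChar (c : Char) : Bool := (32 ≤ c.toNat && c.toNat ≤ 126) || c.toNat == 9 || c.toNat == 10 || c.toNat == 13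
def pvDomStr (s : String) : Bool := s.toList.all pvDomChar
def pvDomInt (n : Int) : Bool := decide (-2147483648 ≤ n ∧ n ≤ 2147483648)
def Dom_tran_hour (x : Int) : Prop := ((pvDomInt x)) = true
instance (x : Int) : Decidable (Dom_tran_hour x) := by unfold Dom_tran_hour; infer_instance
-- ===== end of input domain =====

-- B replaces A's ladder of constant membership checks by one closed-form
-- arithmetic formula ((h+23)%24)//2*2+1 (objective: simpler).

-- ===== PORT A =====
def tran_hour (x : Int) : Option Int :=
  let x := PySem.Int.mod x 100
  if x = 23 ∨ x = 0 then some 23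
  else if x = 1 ∨ x = 2 then some 1
  else if x = 3 ∨ x = 4 then some 3
  else if x = 5 ∨ x = 6 then some 5
  else if x = 7 ∨ x = 8 then some 7
  else if x = 9 ∨ x = 10 then some 9
  else if x = 11 ∨ x = 12 then some 11
  else if x = 13 ∨ x = 14 then some 13
  else if x = 15 ∨ x = 16 then some 15
  else if x = 17 ∨ x = 18 then some 17
  else if x = 19 ∨ x = 20 then some 19
  else if x = 21 ∨ x = 22 then some 21
  else none

-- ===== PORT B =====
def tran_hour_alt (x : Int) : Option Int :=
  let h := PySem.Int.mod x 100
  if h < 24 then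
    some (PySem.Int.floordiv (PySem.Int.mod (h + 23) 24) 2 * 2 + 1)
  else none

-- ===== PRECONDITION & SPEC =====
def Spec_tran_hour (x : Int) (out : Option Int) : Prop := out = tran_hour_alt x
instance (x : Int) (out : Option Int) : Decidable (Spec_tran_hour x out) := by unfold Spec_tran_hour; infer_instance

-- ===== CLAIM =====
def Claim_equal_tran_hour : Prop := ∀ (x : Int), Dom_tran_hour x → Spec_tran_hour x (tran_hour x)

-- ===== LEMMAS AND PROOFS =====

theorem tran_hour_eq_alt_on_residues :
    ∀ n : Nat, n < 100 → tran_hour (n : Int) = tran_hour_alt (n : Int) := by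
  decide

theorem mod100_lt (x : Int) : (PySem.Int.mod x 100).toNat < 100 := by
  have h1 := PySem.Int.mod_nonneg x (b := 100) (by norm_num)
  have h2 := PySem.Int.mod_lt x (b := 100) (by norm_num)
  omega

theorem mod100_cast (x : Int) :
    ((PySem.Int.mod x 100).toNat : Int) = PySem.Int.mod x 100 := by
  have h1 := PySem.Int.mod_nonneg x (b := 100) (by norm_num)
  omega

theorem mod_mod100 (x : Int) :
    PySem.Int.mod (PySem.Int.mod x 100) 100 = PySem.Int.mod x 100 := by
  have h1 := PySem.Int.mod_nonneg x (b := 100) (by norm_num)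
  have h2 := PySem.Int.mod_lt x (b := 100) (by norm_num)
  have := PySem.Int.mod_eq_emod_of_pos (a := PySem.Int.mod x 100) (b := 100) (by norm_num)
  rw [this, Int.emod_eq_of_lt h1 h2]

theorem tran_hour_mod (x : Int) : tran_hour (PySem.Int.mod x 100) = tran_hour x := by
  unfold tran_hour
  rw [mod_mod100]

theorem tran_hour_alt_mod (x : Int) :
    tran_hour_alt (PySem.Int.mod x 100) = tran_hour_alt x := by
  unfold tran_hour_alt
  rw [mod_mod100]

-- ===== VERDICT =====
theorem tran_hour_spec : Claim_equal_tran_hour := by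
  intro x _
  unfold Spec_tran_hour
  rw [← tran_hour_mod x, ← tran_hour_alt_mod x, ← mod100_cast x]
  exact tran_hour_eq_alt_on_residues _ (mod100_lt x)
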